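-- pv_equiv track=rewrite | github.com/sbmsgl1129/interview_bit | bit_manipulation/diff_bits_sum_pairwise.py | cntBits
-- ===== SOURCE A (Python) =====
-- def cntBits(A):
--
--     ans = 0
--     mod = 10**9 + 7
--
--     '''
--     for i in range(len(A) - 1):
--         for j in range(i+1, len(A)):
--            diff_bits = self.count_set_bits(A[i]^A[j])
--
--            ## Adding two times as we have to add for both
--            ## (A[i],A[j]) and (A[j],A[i])
--            ans = (ans + diff_bits) % mod
--            ans = (ans + diff_bits) % mod
--
--     return ans
--     '''
--
--     len_A = len(A)
--     num_ones = [0]*32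
--     for num in A:
--         i = 0
--         while i <= 31:
--             if num & (1<<i):
--                 num_ones[i] += 1
--             i += 1
--
--     for num in num_ones:
--         ans = (ans + (2*num*(len_A-num)) % mod) % mod
--
--     return ans
-- ===== SOURCE B (Python) =====
-- def cntBits(A):
--     mod = 10**9 + 7
--     ans = 0
--     seen = 0
--     ones = [0] * 32
--     for x in A:
--         diff = 0
--         for i in range(32):
--             if x & (1 << i):
--                 diff += seen - ones[i]
--                 ones[i] += 1
--             else:
--                 diff += ones[i]
--         seen += 1
--         ans = (ans + 2 * diff % mod) % mod
--     return ans
-- ===== Notes on version B (the rewrite author's own statement) =====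
-- stated objective: alternative
-- what changed: B replaces A's two-stage algorithm (fill a 32-slot per-bit count table over the whole array, then a separate pass summing 2*c*(n-c) per bit) with a single streaming pass that, for each element, counts the bits on which it differs from all previous elements via running prefix counts and accumulates 2*diff immediately.
import Mathlib
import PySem

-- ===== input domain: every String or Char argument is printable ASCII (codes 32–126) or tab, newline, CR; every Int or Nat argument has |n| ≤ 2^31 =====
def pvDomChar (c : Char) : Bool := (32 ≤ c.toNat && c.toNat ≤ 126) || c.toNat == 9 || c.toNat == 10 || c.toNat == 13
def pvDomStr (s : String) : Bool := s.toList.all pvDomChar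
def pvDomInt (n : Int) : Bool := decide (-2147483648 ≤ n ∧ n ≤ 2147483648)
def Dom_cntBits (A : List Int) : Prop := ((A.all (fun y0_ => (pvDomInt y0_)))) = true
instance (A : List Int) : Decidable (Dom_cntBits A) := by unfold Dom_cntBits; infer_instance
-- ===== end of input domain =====

-- B replaces A's two-stage algorithm (build a 32-slot per-bit table over the whole array, then a
-- separate pass turning each count into 2*c*(n-c)) by a single streaming pass: for each element it
-- counts the bits on which it differs from ALL previous elements (via prefix counts) and accumulates
-- 2*diff immediately; objective: alternative algorithm, same asymptotic cost.

-- ===== PORT A =====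
-- the inner `while i <= 31:` loop of A, updating the num_ones table in place
def innerA (num : Int) (i : Nat) (t : List Int) : List Int :=
  if i ≤ 31 then
    innerA num (i + 1)
      (if PySem.Int.band num ((1 : Int) <<< i) ≠ 0 then t.set i (t.getD i 0 + 1) else t)
  else t
termination_by 32 - i

def cntBits (A : List Int) : Int :=
  let md : Int := 10 ^ 9 + 7
  let lenA : Int := (A.length : Int)
  let numOnes := A.foldl (fun t num => innerA num 0 t) (List.replicate 32 (0 : Int))
  numOnes.foldl (fun ans num =>
    PySem.Int.mod (ans + PySem.Int.mod (2 * num * (lenA - num)) md) md) 0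

-- ===== PORT B =====
-- B's inner `for i in range(32):` loop: state (diff, ones); indices are always in range of the
-- 32-slot list, so List.getD/List.set are exact for Python's ones[i] here.
def innerB (x seen : Int) (p : Int × List Int) (i : Nat) : Int × List Int :=
  if PySem.Int.band x ((1 : Int) <<< i) ≠ 0 then
    (p.1 + (seen - p.2.getD i 0), p.2.set i (p.2.getD i 0 + 1))
  else (p.1 + p.2.getD i 0, p.2)

def cntBits_alt (A : List Int) : Int :=
  let md : Int := 10 ^ 9 + 7
  let st := A.foldl (fun (st : Int × Int × List Int) x =>
      let p := (List.range 32).foldl (innerB x st.2.1) (0, st.2.2)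
      (PySem.Int.mod (st.1 + PySem.Int.mod (2 * p.1) md) md, st.2.1 + 1, p.2))
    (0, 0, List.replicate 32 (0 : Int))
  st.1

-- ===== PRECONDITION & SPEC =====
def Spec_cntBits (A : List Int) (out : Int) : Prop := out = cntBits_alt A
instance (A : List Int) (out : Int) : Decidable (Spec_cntBits A out) := by unfold Spec_cntBits; infer_instance

-- ===== CLAIM (what is proved, stated in full; the proofs are below) =====
def Claim_equal_cntBits : Prop := ∀ (A : List Int), Dom_cntBits A → Spec_cntBits A (cntBits A)

-- ===== LEMMAS AND PROOFS =====

-- number of elements of L with bit i set (shared spec notion for both proofs)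
def onesB (A : List Int) (i : Nat) : Int :=
  A.foldl (fun c x => if PySem.Int.band x ((1 : Int) <<< i) ≠ 0 then c + 1 else c) 0

-- Σ_{i<32} c_i(L) * (|L| - c_i(L)) : the (halved) grand total both programs reduce mod p
def TT (L : List Int) : Int :=
  ((List.range 32).map (fun i : Nat => onesB L i * ((L.length : Int) - onesB L i))).sum

-- number of bit positions (counted with prefix multiplicity) where x differs from elements of L
def dOne (x : Int) (L : List Int) : Int :=
  ((List.range 32).map (fun i : Nat =>
    if PySem.Int.band x ((1 : Int) <<< i) ≠ 0 then (L.length : Int) - onesB L i else onesB L i)).sum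

lemma innerA_length (num : Int) : ∀ (i : Nat) (t : List Int), (innerA num i t).length = t.length := by
  intro i t
  induction i, t using innerA.induct num with
  | case1 i t h ih =>
    rw [innerA, if_pos h]
    simp only [dite_eq_ite] at ih
    rw [ih]; split <;> simp
  | case2 i t h => rw [innerA, if_neg h]

lemma innerA_getD (num : Int) : ∀ (j : Nat) (t : List Int), t.length = 32 →
    ∀ i : Nat, i < 32 →
    (innerA num j t).getD i 0 =
      t.getD i 0 + (if j ≤ i ∧ PySem.Int.band num ((1 : Int) <<< i) ≠ 0 then 1 else 0) := by
  intro j t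
  induction j, t using innerA.induct num with
  | case1 j t h ih =>
    intro hlen i hi
    rw [innerA, if_pos h]
    simp only [dite_eq_ite] at ih
    have hlen' : (if PySem.Int.band num ((1 : Int) <<< j) ≠ 0 then t.set j (t.getD j 0 + 1) else t).length = 32 := by
      split <;> simp [hlen]
    rw [ih hlen' i hi]
    by_cases hb : PySem.Int.band num ((1 : Int) <<< j) ≠ 0
    · rw [if_pos hb]
      by_cases hji : j = i
      · subst hji
        have hjl : j < t.length := by omega
        rw [List.getD_eq_getElem _ _ (by simpa [hlen] using hjl), List.getElem_set_self]
        rw [List.getD_eq_getElem _ _ hjl]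
        have h1 : ¬ (j + 1 ≤ j) := by omega
        simp [h1, hb]
      · have : (t.set j (t.getD j 0 + 1)).getD i 0 = t.getD i 0 := by
          by_cases hil : i < t.length
          · rw [List.getD_eq_getElem _ _ (by simpa [hlen] using hil),
                List.getD_eq_getElem _ _ hil, List.getElem_set_ne (by omega)]
          · rw [List.getD_eq_default _ _ (by simpa [hlen] using (by omega : ¬ i < t.length)),
                List.getD_eq_default _ _ (by omega)]
        rw [this]
        congr 1
        have : (j + 1 ≤ i) ↔ (j ≤ i) := by omega
        simp [this]
    · rw [if_neg hb]
      congr 1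
      by_cases hji : j = i
      · subst hji; simp [hb]
      · have : (j + 1 ≤ i) ↔ (j ≤ i) := by omega
        simp [this]
  | case2 j t h =>
    intro hlen i hi
    rw [innerA, if_neg h]
    have : ¬ (j ≤ i) := by omega
    simp [this]

lemma onesB_append (L : List Int) (x : Int) (i : Nat) :
    onesB (L ++ [x]) i
      = onesB L i + (if PySem.Int.band x ((1 : Int) <<< i) ≠ 0 then 1 else 0) := by
  simp only [onesB, List.foldl_append, List.foldl_cons, List.foldl_nil]
  split <;> simp

lemma fold_table_length (A : List Int) (t : List Int) :
    (A.foldl (fun t num => innerA num 0 t) t).length = t.length := by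
  induction A generalizing t with
  | nil => rfl
  | cons x rest ih => simp only [List.foldl_cons]; rw [ih, innerA_length]

lemma ones_shift (i : Nat) : ∀ (A : List Int) (c : Int),
    A.foldl (fun c x => if PySem.Int.band x ((1 : Int) <<< i) ≠ 0 then c + 1 else c) c
      = c + A.foldl (fun c x => if PySem.Int.band x ((1 : Int) <<< i) ≠ 0 then c + 1 else c) 0 := by
  intro A
  induction A with
  | nil => intro c; simp
  | cons x rest ih =>
    intro c
    rw [List.foldl_cons, List.foldl_cons]
    split
    · rw [ih]
      conv_rhs => rw [ih]
      ring
    · rw [ih]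

lemma onesB_cons (x : Int) (rest : List Int) (i : Nat) :
    onesB (x :: rest) i
      = (if PySem.Int.band x ((1 : Int) <<< i) ≠ 0 then 1 else 0) + onesB rest i := by
  simp only [onesB, List.foldl_cons]
  rw [ones_shift]
  split <;> ring

lemma fold_table_getD : ∀ (A : List Int) (t : List Int), t.length = 32 →
    ∀ i : Nat, i < 32 →
    (A.foldl (fun t num => innerA num 0 t) t).getD i 0 = t.getD i 0 + onesB A i := by
  intro A
  induction A with
  | nil => intro t hlen i hi; simp [onesB]
  | cons x rest ih =>
    intro t hlen i hi
    simp only [List.foldl_cons]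
    have hlen' : (innerA x 0 t).length = 32 := by rw [innerA_length]; exact hlen
    rw [ih _ hlen' i hi, innerA_getD x 0 t hlen i hi, onesB_cons]
    have hz : (0 : Nat) ≤ i := Nat.zero_le i
    simp only [hz, true_and]
    split <;> ring

lemma table_eq (A : List Int) :
    A.foldl (fun t num => innerA num 0 t) (List.replicate 32 (0 : Int))
      = (List.range 32).map (fun i => onesB A i) := by
  apply List.ext_getElem
  · rw [fold_table_length]; simp
  · intro i h1 h2
    have hi : i < 32 := by simpa using h2
    have hlen : (A.foldl (fun t num => innerA num 0 t) (List.replicate 32 (0 : Int))).length = 32 := by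
      rw [fold_table_length]; simp
    rw [← List.getD_eq_getElem _ 0 h1,
        fold_table_getD A _ (by simp) i hi]
    have hrep : (List.replicate 32 (0 : Int)).getD i 0 = 0 := by
      rw [List.getD_eq_getElem _ _ (by simpa using hi)]
      exact List.getElem_replicate _
    rw [hrep]
    simp

-- folding `(ans + t % md) % md` over a list of terms is the sum mod md
lemma modfold {α : Type} (md : Int) (hmd : 0 < md) (f : α → Int) :
    ∀ (l : List α) (a : Int), 0 ≤ a → a < md →
      l.foldl (fun ans t => PySem.Int.mod (ans + PySem.Int.mod (f t) md) md) a
        = (a + (l.map f).sum) % md := by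
  intro l
  induction l with
  | nil => intro a h1 h2; simp [Int.emod_eq_of_lt h1 h2]
  | cons t rest ih =>
    intro a h1 h2
    rw [List.foldl_cons]
    rw [PySem.Int.mod_eq_emod_of_pos (h := hmd), PySem.Int.mod_eq_emod_of_pos (h := hmd)]
    rw [ih _ (Int.emod_nonneg _ (by omega)) (Int.emod_lt_of_pos _ hmd)]
    simp only [List.map_cons, List.sum_cons]
    rw [Int.add_emod_emod, Int.emod_add_emod]
    ring_nf

-- the streaming increment: appending x to L raises the grand total by exactly dOne x L
lemma TT_append (L : List Int) (x : Int) : TT (L ++ [x]) = TT L + dOne x L := by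
  unfold TT dOne
  rw [← PySem.List.sum_map_add_int]
  congr 1
  apply List.map_congr_left
  intro i _
  rw [onesB_append]
  have hl : (((L ++ [x]).length : Int)) = (L.length : Int) + 1 := by
    simp
  rw [hl]
  split <;> ring

-- the inner-loop fold of B computes (dOne restricted to k bits, updated table)
lemma innerB_fold (x : Int) (L : List Int) : ∀ k : Nat, k ≤ 32 →
    (List.range k).foldl (innerB x (L.length : Int))
        (0, (List.range 32).map (fun i => onesB L i))
      = (((List.range k).map (fun i : Nat =>
            if PySem.Int.band x ((1 : Int) <<< i) ≠ 0 then (L.length : Int) - onesB L i else onesB L i)).sum,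
         (List.range 32).map (fun i : Nat => if i < k then onesB (L ++ [x]) i else onesB L i)) := by
  intro k
  induction k with
  | zero =>
    intro _
    simp
  | succ k ih =>
    intro hk
    rw [show List.range (k+1) = List.range k ++ [k] from List.range_succ,
        List.foldl_append, ih (by omega), List.foldl_cons, List.foldl_nil]
    have hgetD : ((List.range 32).map (fun i : Nat => if i < k then onesB (L ++ [x]) i else onesB L i)).getD k 0
        = onesB L k := by
      rw [List.getD_eq_getElem _ _ (by simp; omega)]
      simp
    unfold innerB
    by_cases hb : PySem.Int.band x ((1 : Int) <<< k) ≠ 0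
    · rw [if_pos hb]
      simp only [hgetD]
      refine Prod.ext ?_ ?_
      · dsimp only
        rw [List.map_append, List.sum_append]
        simp [hb]
      · dsimp only
        apply List.ext_getElem
        · simp
        · intro i h1 h2
          have hi : i < 32 := by simpa using h2
          by_cases hik : i = k
          · subst hik
            rw [List.getElem_set_self (by simp; omega)]
            simp [onesB_append, hb]
          · rw [List.getElem_set_ne (by omega)]
            simp only [List.getElem_map, List.getElem_range]
            have : i < k + 1 ↔ i < k := by omega
            simp [this]
    · rw [if_neg hb]
      simp only [hgetD]
      refine Prod.ext ?_ ?_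
      · dsimp only
        rw [List.map_append, List.sum_append]
        simp [hb]
      · dsimp only
        apply List.map_congr_left
        intro i _
        by_cases hik : i = k
        · subst hik
          simp [onesB_append, hb]
        · have : i < k + 1 ↔ i < k := by omega
          simp [this]

-- inside range 32 the `i < 32` guard in the table description is vacuous
lemma table_nolt (L : List Int) (x : Int) :
    (List.range 32).map (fun i : Nat => if i < 32 then onesB (L ++ [x]) i else onesB L i)
      = (List.range 32).map (fun i : Nat => onesB (L ++ [x]) i) := by
  apply List.map_congr_left
  intro i hi
  simp only [List.mem_range] at hi
  simp [hi]

-- B's streaming loop maintains (2·TT of the prefix mod p, prefix length, per-bit table of the prefix)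
lemma outer_inv (A : List Int) :
    A.foldl (fun (st : Int × Int × List Int) x =>
        let p := (List.range 32).foldl (innerB x st.2.1) (0, st.2.2)
        (PySem.Int.mod (st.1 + PySem.Int.mod (2 * p.1) ((10:Int) ^ 9 + 7)) ((10:Int) ^ 9 + 7), st.2.1 + 1, p.2))
      (0, 0, List.replicate 32 (0 : Int))
    = ((2 * TT A) % ((10:Int) ^ 9 + 7), (A.length : Int), (List.range 32).map (fun i : Nat => onesB A i)) := by
  induction A using List.reverseRecOn with
  | nil =>
    have h0 : (List.range 32).map (fun i : Nat => onesB ([] : List Int) i) = List.replicate 32 (0 : Int) := by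
      simp [onesB]
    rw [h0]
    simp [TT, onesB]
  | append_singleton L x ih =>
    rw [List.foldl_append, ih, List.foldl_cons, List.foldl_nil]
    have hfold := innerB_fold x L 32 (le_refl 32)
    dsimp only
    rw [hfold]
    rw [table_nolt]
    refine Prod.ext ?_ (Prod.ext ?_ ?_)
    · dsimp only
      rw [PySem.Int.mod_eq_emod_of_pos (h := by norm_num), PySem.Int.mod_eq_emod_of_pos (h := by norm_num)]
      rw [Int.add_emod_emod, Int.emod_add_emod]
      rw [TT_append]
      have : dOne x L = ((List.range 32).map (fun i : Nat =>
          if PySem.Int.band x ((1 : Int) <<< i) ≠ 0 then (L.length : Int) - onesB L i else onesB L i)).sum := rfl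
      rw [← this]
      ring_nf
    · simp
    · rfl

lemma alt_eq (A : List Int) : cntBits_alt A = (2 * TT A) % ((10:Int) ^ 9 + 7) := by
  unfold cntBits_alt
  dsimp only
  rw [outer_inv]

lemma a_eq (A : List Int) : cntBits A = (2 * TT A) % ((10:Int) ^ 9 + 7) := by
  unfold cntBits
  dsimp only
  rw [table_eq, List.foldl_map]
  rw [modfold ((10:Int) ^ 9 + 7) (by norm_num)
      (fun i : Nat => 2 * onesB A i * ((A.length : Int) - onesB A i)) (List.range 32) 0
      (le_refl 0) (by norm_num)]
  congr 1
  rw [zero_add]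
  have : (List.range 32).map (fun i : Nat => 2 * onesB A i * ((A.length : Int) - onesB A i))
      = (List.range 32).map (fun i : Nat => 2 * (onesB A i * ((A.length : Int) - onesB A i))) := by
    apply List.map_congr_left
    intro i _
    ring
  rw [this, List.sum_map_mul_left]
  rfl

-- ===== VERDICT (by name: the statement is the Claim_ definition above) =====
theorem cntBits_spec : Claim_equal_cntBits := by
  intro A _
  show cntBits A = cntBits_alt A
  rw [a_eq, alt_eq]
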